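-- pv_equiv track=rewrite | github.com/TMWcodes/MMBOT_Systems | lib/bot_detection.py | count_repeated_sequences
-- ===== SOURCE A (Python) =====
-- def count_repeated_sequences(coordinates, min_sequence_length=5, min_repetitions=2):
--     sequences = {}
--     for i in range(len(coordinates) - min_sequence_length + 1):
--         sequence = tuple(tuple(coord) for coord in coordinates[i:i + min_sequence_length])
--         if sequence in sequences:
--             sequences[sequence].append(i)
--         else:
--             sequences[sequence] = [i]
--
--     repeated_sequence_count = sum(1 for indices in sequences.values() if len(indices) >= min_repetitions)
--     return repeated_sequence_count
-- ===== SOURCE B (Python) =====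
-- def count_repeated_sequences(coordinates, min_sequence_length=5, min_repetitions=2):
--     # Sort-then-scan: sort the windows so equal windows are adjacent, then one
--     # linear scan counts maximal runs of length >= min_repetitions.
--     windows = sorted(tuple(tuple(coord) for coord in coordinates[i:i + min_sequence_length])
--                      for i in range(len(coordinates) - min_sequence_length + 1))
--     total = 0
--     run = 0
--     prev = None
--     for w in windows:
--         if run > 0 and w == prev:
--             run += 1
--         else:
--             if run > 0 and run >= min_repetitions:
--                 total += 1
--             run = 1
--             prev = w
--     if run > 0 and run >= min_repetitions:
--         total += 1
--     return total
-- ===== Notes on version B (the rewrite author's own statement) =====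
-- stated objective: alternative
-- what changed: B replaces A's dict that groups each window's occurrence indices into lists by sort-then-scan: it sorts the window list so equal windows become adjacent, then one linear pass counts maximal runs of length >= min_repetitions.
import Mathlib
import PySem

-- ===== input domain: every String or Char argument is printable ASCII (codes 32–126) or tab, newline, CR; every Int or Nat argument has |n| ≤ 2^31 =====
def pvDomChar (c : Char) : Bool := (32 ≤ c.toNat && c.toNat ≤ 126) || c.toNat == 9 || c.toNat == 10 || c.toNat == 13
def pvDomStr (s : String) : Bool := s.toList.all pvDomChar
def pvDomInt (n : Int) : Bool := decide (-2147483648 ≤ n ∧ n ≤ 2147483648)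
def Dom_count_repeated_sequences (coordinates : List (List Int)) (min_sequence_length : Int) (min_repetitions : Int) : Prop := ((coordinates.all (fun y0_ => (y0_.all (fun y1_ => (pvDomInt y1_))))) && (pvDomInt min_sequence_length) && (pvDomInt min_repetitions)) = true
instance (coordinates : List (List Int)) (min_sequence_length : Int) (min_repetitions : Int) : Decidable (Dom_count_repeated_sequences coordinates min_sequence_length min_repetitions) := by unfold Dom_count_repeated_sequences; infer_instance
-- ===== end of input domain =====

-- B replaces A's dict of per-window occurrence-index lists by sort-then-scan: sort the windows
-- so equal windows become adjacent, then one linear scan counts maximal runs of length ≥ threshold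
-- (objective: alternative — a different algorithm of similar cost; not claimed faster).

-- ===== PORT A =====
-- tuple(tuple(coord) for coord in …) is the identity under the list encoding of tuples.
def count_repeated_sequences (coordinates : List (List Int)) (min_sequence_length : Int) (min_repetitions : Int) : Int :=
  let sequences : PySem.Dict (List (List Int)) (List Int) :=
    (PySem.List.pyRange 0 ((coordinates.length : Int) - min_sequence_length + 1) 1).foldl
      (fun d i =>
        let sequence := PySem.List.slice coordinates (some i) (some (i + min_sequence_length))
        if d.contains sequence then
          d.insert sequence (d.getD sequence [] ++ [i])    -- sequences[sequence].append(i)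
        else
          d.insert sequence [i])                           -- sequences[sequence] = [i]
      PySem.Dict.empty
  -- sum(1 for indices in sequences.values() if len(indices) >= min_repetitions)
  sequences.values.foldl
    (fun acc indices => if min_repetitions ≤ (indices.length : Int) then acc + 1 else acc) 0

-- ===== PORT B =====
def count_repeated_sequences_alt (coordinates : List (List Int)) (min_sequence_length : Int) (min_repetitions : Int) : Int :=
  let windows : List (List (List Int)) :=
    (PySem.List.pyRange 0 ((coordinates.length : Int) - min_sequence_length + 1) 1).map
      (fun i => PySem.List.slice coordinates (some i) (some (i + min_sequence_length)))
  -- sorted(...) of the windows: a stable sort under Python's (lexicographic) tuple order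
  let ws := windows.mergeSort (fun a b => decide (a ≤ b))
  -- one pass: total, run, prev (prev = None initially)
  let s := ws.foldl
      (fun (st : Int × Int × Option (List (List Int))) w =>
        if 0 < st.2.1 ∧ st.2.2 = some w then (st.1, st.2.1 + 1, st.2.2)
        else ((if 0 < st.2.1 ∧ min_repetitions ≤ st.2.1 then st.1 + 1 else st.1), 1, some w))
      (0, 0, none)
  if 0 < s.2.1 ∧ min_repetitions ≤ s.2.1 then s.1 + 1 else s.1

-- ===== PRECONDITION & SPEC =====
def Spec_count_repeated_sequences (coordinates : List (List Int)) (min_sequence_length : Int) (min_repetitions : Int) (out : Int) : Prop := out = count_repeated_sequences_alt coordinates min_sequence_length min_repetitions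
instance (coordinates : List (List Int)) (min_sequence_length : Int) (min_repetitions : Int) (out : Int) : Decidable (Spec_count_repeated_sequences coordinates min_sequence_length min_repetitions out) := by unfold Spec_count_repeated_sequences; infer_instance

-- ===== CLAIM (what is proved, stated in full; the proofs are below) =====
def Claim_equal_count_repeated_sequences : Prop := ∀ (coordinates : List (List Int)) (min_sequence_length : Int) (min_repetitions : Int), Dom_count_repeated_sequences coordinates min_sequence_length min_repetitions → Spec_count_repeated_sequences coordinates min_sequence_length min_repetitions (count_repeated_sequences coordinates min_sequence_length min_repetitions)

-- ===== LEMMAS AND PROOFS =====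

-- B's loop body and final flush, named for the proofs.
def pvStep (R : Int) (st : Int × Int × Option (List (List Int))) (w : List (List Int)) :
    Int × Int × Option (List (List Int)) :=
  if 0 < st.2.1 ∧ st.2.2 = some w then (st.1, st.2.1 + 1, st.2.2)
  else ((if 0 < st.2.1 ∧ R ≤ st.2.1 then st.1 + 1 else st.1), 1, some w)

def pvFinish (R : Int) (st : Int × Int × Option (List (List Int))) : Int :=
  if 0 < st.2.1 ∧ R ≤ st.2.1 then st.1 + 1 else st.1

lemma pvFinish_foldl_total (R : Int) :
    ∀ (l : List (List (List Int))) (T r : Int) (p : Option (List (List Int))),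
      pvFinish R (l.foldl (pvStep R) (T, r, p)) = T + pvFinish R (l.foldl (pvStep R) (0, r, p)) := by
  intro l
  induction l with
  | nil => intro T r p; simp only [List.foldl_nil, pvFinish]; split_ifs <;> ring
  | cons w l ih =>
      intro T r p
      simp only [List.foldl_cons]
      by_cases h : 0 < r ∧ p = some w
      · simp only [pvStep]
        rw [if_pos h, if_pos h, ih, ih]
      · simp only [pvStep]
        rw [if_neg h, if_neg h]
        by_cases h2 : 0 < r ∧ R ≤ r
        · rw [if_pos h2, if_pos h2, ih, ih (T := (0:Int) + 1)]
          ring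
        · rw [if_neg h2, if_neg h2, ih]

lemma pvStep_replicate (R : Int) (a : List (List Int)) :
    ∀ (m : Nat) (T r : Int), 0 < r →
      (List.replicate m a).foldl (pvStep R) (T, r, some a) = (T, r + m, some a) := by
  intro m
  induction m with
  | zero => intro T r _; simp
  | succ m ih =>
      intro T r hr
      rw [List.replicate_succ, List.foldl_cons]
      have h1 : pvStep R (T, r, some a) a = (T, r + 1, some a) := by
        simp [pvStep, hr]
      rw [h1, ih _ _ (by omega)]
      have h2 : r + 1 + (m : Int) = r + ((m : Nat) + 1 : Nat) := by push_cast; ring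
      rw [h2]

lemma block_decomp (a : List (List Int)) :
    ∀ ws : List (List (List Int)), ws.Pairwise (· ≤ ·) → (∀ x ∈ ws, a ≤ x) →
      ws = List.replicate (ws.count a) a ++ ws.dropWhile (fun x => x == a) ∧
        a ∉ ws.dropWhile (fun x => x == a) := by
  intro ws
  induction ws with
  | nil => intro _ _; simp
  | cons b t ih =>
      intro hpw hdom
      by_cases hb : b = a
      · subst hb
        have hdt : ∀ x ∈ t, b ≤ x := fun x hx => (List.pairwise_cons.mp hpw).1 x hx
        obtain ⟨h1, h2⟩ := ih (List.pairwise_cons.mp hpw).2 hdt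
        have hd : (b :: t).dropWhile (fun x => x == b) = t.dropWhile (fun x => x == b) := by
          rw [List.dropWhile_cons]; simp
        constructor
        · have hc : (b :: t).count b = t.count b + 1 := by simp
          rw [hc, List.replicate_succ, List.cons_append, hd]
          exact congrArg (b :: ·) h1
        · rw [hd]; exact h2
      · have hab : a < b := lt_of_le_of_ne (hdom b (by simp)) (Ne.symm hb)
        have hnot : a ∉ b :: t := by
          intro hmem
          rcases List.mem_cons.mp hmem with h | h
          · exact hb h.symm
          · exact absurd ((List.pairwise_cons.mp hpw).1 a h) (not_le.mpr hab)
        have hd : (b :: t).dropWhile (fun x => x == a) = b :: t := by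
          rw [List.dropWhile_cons]; simp [hb]
        constructor
        · have hc : (b :: t).count a = 0 := List.count_eq_zero.mpr hnot
          rw [hc, hd]; simp
        · rw [hd]; exact hnot

lemma runScan_append (R : Int) (k : Nat) (a : List (List Int)) (rest : List (List (List Int)))
    (hk1 : 1 ≤ k) (hnot : a ∉ rest)
    (hIH : pvFinish R (rest.foldl (pvStep R) (0, 0, none))
        = ((rest.dedup.countP (fun w => decide (R ≤ (rest.count w : Int)))) : Int)) :
    pvFinish R ((List.replicate k a ++ rest).foldl (pvStep R) (0, 0, none))
      = (((List.replicate k a ++ rest).dedup.countP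
          (fun w => decide (R ≤ ((List.replicate k a ++ rest).count w : Int)))) : Int) := by
  have hkpos : (0:Int) < (k : Int) := by exact_mod_cast hk1
  have hfront : (List.replicate k a).foldl (pvStep R) ((0:Int), (0:Int), none)
      = ((0:Int), (k : Int), some a) := by
    cases hkc : k with
    | zero => omega
    | succ m =>
        rw [List.replicate_succ, List.foldl_cons]
        have h1 : pvStep R ((0:Int), (0:Int), none) a = (0, 1, some a) := by
          simp [pvStep]
        rw [h1, pvStep_replicate R a m 0 1 (by omega)]
        have h2 : (1:Int) + m = ((m+1 : Nat) : Int) := by push_cast; ring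
        rw [h2]
  have hcount_a : (List.replicate k a ++ rest).count a = k := by
    rw [List.count_append, List.count_replicate, List.count_eq_zero.mpr hnot]
    simp
  have hcount_ne : ∀ w, w ≠ a → (List.replicate k a ++ rest).count w = rest.count w := by
    intro w hw
    rw [List.count_append, List.count_replicate]
    simp [Ne.symm hw]
  have hperm : (List.replicate k a ++ rest).dedup.Perm (a :: rest.dedup) := by
    rw [List.perm_ext_iff_of_nodup (List.nodup_dedup _)
      (List.nodup_cons.mpr ⟨fun h => hnot (List.mem_dedup.mp h), List.nodup_dedup _⟩)]
    intro x
    rw [List.mem_dedup, List.mem_append, List.mem_replicate, List.mem_cons, List.mem_dedup]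
    constructor
    · rintro (⟨-, h⟩ | h)
      · exact Or.inl h
      · exact Or.inr h
    · rintro (h | h)
      · exact Or.inl ⟨by omega, h⟩
      · exact Or.inr h
  have hRHS : ((List.replicate k a ++ rest).dedup.countP
        (fun w => decide (R ≤ ((List.replicate k a ++ rest).count w : Int))))
      = (if R ≤ (k : Int) then 1 else 0)
        + rest.dedup.countP (fun w => decide (R ≤ (rest.count w : Int))) := by
    rw [hperm.countP_eq, List.countP_cons]
    have h1 : (rest.dedup.countP (fun w => decide (R ≤ ((List.replicate k a ++ rest).count w : Int))))
        = rest.dedup.countP (fun w => decide (R ≤ (rest.count w : Int))) := by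
      apply List.countP_congr
      intro w hw
      have hwa : w ≠ a := fun h => hnot (List.mem_dedup.mp (h ▸ hw))
      simp only [hcount_ne w hwa]
    rw [h1, hcount_a]
    simp only [decide_eq_true_eq]
    split_ifs <;> omega
  rw [List.foldl_append, hfront, hRHS]
  cases hrc : rest with
  | nil =>
      simp only [List.foldl_nil]
      have hfin : pvFinish R ((0:Int), (k : Int), some a)
          = if R ≤ (k : Int) then 1 else 0 := by
        simp only [pvFinish]
        split_ifs with h1 h2 <;> first | rfl | omega
      rw [hfin]
      simp
  | cons b rest' =>
      have hba : a ≠ b := fun h => hnot (by rw [hrc, ← h]; simp)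
      rw [List.foldl_cons]
      have h1 : pvStep R ((0:Int), (k : Int), some a) b
          = ((if R ≤ (k : Int) then 1 else 0), 1, some b) := by
        simp only [pvStep]
        rw [if_neg (by simp [hba])]
        split_ifs with h2 h3 <;> first | rfl | omega
      rw [h1, pvFinish_foldl_total]
      have h2 : pvFinish R (rest'.foldl (pvStep R) ((0:Int), 1, some b))
          = pvFinish R (rest.foldl (pvStep R) ((0:Int), 0, none)) := by
        rw [hrc, List.foldl_cons]
        have h3 : pvStep R ((0:Int), (0:Int), none) b = (0, 1, some b) := by
          simp [pvStep]
        rw [h3]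
      rw [h2, hIH, ← hrc]
      split_ifs <;> push_cast <;> ring

lemma runScan_sorted (R : Int) :
    ∀ (n : Nat) (ws : List (List (List Int))), ws.length ≤ n → ws.Pairwise (· ≤ ·) →
      pvFinish R (ws.foldl (pvStep R) (0, 0, none))
        = ((ws.dedup.countP (fun w => decide (R ≤ (ws.count w : Int)))) : Int) := by
  intro n
  induction n with
  | zero =>
      intro ws hlen _
      have h0 : ws = [] := List.eq_nil_of_length_eq_zero (Nat.le_zero.mp hlen)
      subst h0; simp [pvFinish]
  | succ n ih =>
      intro ws hlen hpw
      cases hws : ws with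
      | nil => simp [pvFinish]
      | cons a t =>
          subst hws
          have hdom : ∀ x ∈ a :: t, a ≤ x := by
            intro x hx
            rcases List.mem_cons.mp hx with h | h
            · exact h ▸ le_refl a
            · exact (List.pairwise_cons.mp hpw).1 x h
          obtain ⟨hdec, hnot⟩ := block_decomp a (a :: t) hpw hdom
          have hpwr : ((a :: t).dropWhile (fun x => x == a)).Pairwise (· ≤ ·) :=
            List.Pairwise.sublist (List.dropWhile_sublist _) hpw
          have hk1 : 1 ≤ (a :: t).count a := List.one_le_count_iff.mpr (by simp)
          have hlenr : ((a :: t).dropWhile (fun x => x == a)).length ≤ n := by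
            have h := congrArg List.length hdec
            rw [List.length_append, List.length_replicate] at h
            simp only [List.length_cons] at h hlen
            omega
          have hIH := ih _ hlenr hpwr
          revert hdec hnot hk1 hIH
          generalize (a :: t).count a = k
          generalize (a :: t).dropWhile (fun x => x == a) = rest
          intro hdec hnot hk1 hIH
          rw [hdec]
          exact runScan_append R k a rest hk1 hnot hIH

-- A's grouped dict, characterised: its values' lengths, filtered by the threshold, count
-- exactly the distinct windows (first-occurrence order) whose multiplicity meets the threshold.
lemma groupDict_core (R : Int) (idxs : List Int) (key : Int → List (List Int)) :
    ((idxs.foldl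
      (fun d i => d.modify (key i) [] (fun l => l ++ [i]))
      (PySem.Dict.empty : PySem.Dict (List (List Int)) (List Int))).values).countP
        (fun l => decide (R ≤ (l.length : Int)))
      = (PySem.Set.ofList (idxs.map key)).countP
          (fun w => decide (R ≤ (((idxs.map key).count w : Nat) : Int))) := by
  set D := idxs.foldl (fun d i => d.modify (key i) [] (fun l => l ++ [i]))
      (PySem.Dict.empty : PySem.Dict (List (List Int)) (List Int)) with hD
  have hnodup : D.keys.Nodup := by
    exact PySem.Dict.nodup_keys_foldl_modify_key idxs key [] (fun d i l => l ++ [i]) _ (by simp)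
  have hkeys : D.keys = PySem.Set.ofList (idxs.map key) := by
    have h := PySem.Dict.keys_foldl_modify_key idxs key [] (fun d i l => l ++ [i])
      (PySem.Dict.empty : PySem.Dict (List (List Int)) (List Int))
    simpa [PySem.Set.update, PySem.Set.ofList, PySem.Set.empty] using h
  have hgetD : ∀ w, D.getD w [] =
      ((idxs.map (fun i => (key i, i))).filter (fun p => p.1 == w)).map (fun p => p.2) := by
    intro w
    have h := PySem.Dict.getD_foldl_modify_append (idxs.map (fun i => (key i, i)))
      (PySem.Dict.empty : PySem.Dict (List (List Int)) (List Int)) w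
    rw [List.foldl_map] at h
    simpa using h
  have hvals := PySem.Dict.values_eq_map_keys D hnodup []
  rw [hvals, List.countP_map, hkeys]
  refine List.countP_congr ?_
  intro w hw
  simp only [Function.comp, hgetD w, List.length_map]
  have hfm : List.filter (fun p => p.1 == w) (idxs.map (fun i => (key i, i)))
      = (idxs.filter (fun i => key i == w)).map (fun i => (key i, i)) := by
    rw [List.filter_map]; simp [Function.comp_def]
  rw [hfm, List.length_map, List.count, List.countP_map]
  simp [Function.comp_def, List.countP_eq_length_filter]

-- A's loop body (in / append / new-entry) is exactly Dict.modify with default [].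
lemma stepA_eq_modify (d : PySem.Dict (List (List Int)) (List Int)) (k : List (List Int)) (i : Int) :
    (if d.contains k then d.insert k (d.getD k [] ++ [i]) else d.insert k [i])
      = d.modify k [] (fun l => l ++ [i]) := by
  by_cases h : d.contains k = true
  · simp [h, PySem.Dict.modify]
  · simp [h, PySem.Dict.modify, PySem.Dict.getD_of_not_contains d [] (by simpa using h)]

-- ===== VERDICT (by name: the statement is the Claim_ definition above) =====
theorem count_repeated_sequences_spec : Claim_equal_count_repeated_sequences := by
  intro coordinates min_sequence_length min_repetitions _
  unfold Spec_count_repeated_sequences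
  unfold count_repeated_sequences count_repeated_sequences_alt
  simp only []
  set windows : List (List (List Int)) :=
    (PySem.List.pyRange 0 ((coordinates.length : Int) - min_sequence_length + 1) 1).map
      (fun i => PySem.List.slice coordinates (some i) (some (i + min_sequence_length))) with hwin
  -- A side → countP over the first-occurrence set of the windows
  rw [show (fun (d : PySem.Dict (List (List Int)) (List Int)) (i : Int) =>
        let sequence := PySem.List.slice coordinates (some i) (some (i + min_sequence_length))
        if d.contains sequence then
          d.insert sequence (d.getD sequence [] ++ [i])
        else
          d.insert sequence [i])
      = (fun (d : PySem.Dict (List (List Int)) (List Int)) (i : Int) =>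
          d.modify (PySem.List.slice coordinates (some i) (some (i + min_sequence_length))) []
            (fun l => l ++ [i])) from
    funext fun d => funext fun i => stepA_eq_modify d _ i]
  rw [PySem.List.foldl_ite_add_one
        (p := fun (indices : List Int) => min_repetitions ≤ (indices.length : Int))]
  rw [groupDict_core min_repetitions _ _]
  -- B side → the run-scan lemma over the sorted windows
  have hBstep : (fun (st : Int × Int × Option (List (List Int))) w =>
      if 0 < st.2.1 ∧ st.2.2 = some w then (st.1, st.2.1 + 1, st.2.2)
      else ((if 0 < st.2.1 ∧ min_repetitions ≤ st.2.1 then st.1 + 1 else st.1), 1, some w))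
      = pvStep min_repetitions := rfl
  have hBfin : ∀ st : Int × Int × Option (List (List Int)),
      (if 0 < st.2.1 ∧ min_repetitions ≤ st.2.1 then st.1 + 1 else st.1)
        = pvFinish min_repetitions st := fun _ => rfl
  have hpw : (windows.mergeSort (fun a b => decide (a ≤ b))).Pairwise (· ≤ ·) :=
    (List.pairwise_mergeSort
      (fun a b c hab hbc => by
        simp only [decide_eq_true_eq] at *; exact le_trans hab hbc)
      (fun a b => by simp only [Bool.or_eq_true, decide_eq_true_eq]; exact le_total a b)
      windows).imp (fun h => of_decide_eq_true h)
  rw [hBstep, hBfin]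
  rw [runScan_sorted min_repetitions
      (windows.mergeSort (fun a b => decide (a ≤ b))).length _ le_rfl hpw]
  -- bridge: same distinct elements, same multiplicities
  have hpermw : (windows.mergeSort (fun a b => decide (a ≤ b))).Perm windows :=
    List.mergeSort_perm windows _
  have hpred : (fun w => decide (min_repetitions ≤
      ((windows.mergeSort (fun a b => decide (a ≤ b))).count w : Int)))
      = (fun w => decide (min_repetitions ≤ ((windows.count w : Nat) : Int))) := by
    funext w; rw [hpermw.count_eq]
  have hpermd : (windows.mergeSort (fun a b => decide (a ≤ b))).dedup.Perm
      (PySem.Set.ofList windows) := by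
    rw [List.perm_ext_iff_of_nodup (List.nodup_dedup _) (PySem.Set.nodup_ofList _)]
    intro x
    rw [List.mem_dedup, PySem.Set.mem_ofList, hpermw.mem_iff]
  rw [hpred, hpermd.countP_eq, zero_add]
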